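-- pv_equiv track=rewrite | github.com/vthai/IFN680-AI | linear-algebra/vector.py | linear_combination
-- ===== SOURCE A (Python) =====
-- def _amend(v1, v2):
--     diff = len(v2) - len(v1)
--     v1.extend([0] * (diff if diff > 0 else 0))
--     v2.extend([0] * (abs(diff) if diff < 0 else 0))
--
-- def add(v1, v2):
--     _amend(v1, v2)
--
--     return [c1 + c2 for c1, c2 in zip(v1, v2)]
--
-- def scale(v1, alpha):
--     return [x * alpha for x in v1]
--
-- def linear_combination(vectors, coefficients):
--     vnew = [0] * len(vectors)
--     for index in range(0, len(vectors)):
--         vnew[index] = scale(vectors[index], coefficients[index])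
--
--     v = vnew[0]
--     for index in range(1, len(vnew)):
--         v = add(v, vnew[index])
--     return v
-- ===== SOURCE B (Python) =====
-- def linear_combination(vectors, coefficients):
--     scaled = [[x * coefficients[i] for x in vec] for i, vec in enumerate(vectors)]
--     width = max(map(len, scaled), default=0)
--     return [sum((vec[j] for vec in scaled if j < len(vec)), 0) for j in range(width)]
-- ===== Notes on version B (the rewrite author's own statement) =====
-- stated objective: alternative
-- what changed: B scales once, computes the output width as the maximum scaled length, and builds the result column by column summing each position directly, instead of A's repeated pairwise add with zero-padding amendment.
-- crash fix: A raises IndexError when vectors is empty or coefficients is shorter than vectors; when every vector past the coefficients is empty, B instead returns the column-wise combination of the remaining vectors ([] for empty input). — e.g. on linear_combination([], [3]): A raises IndexError, B returns []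
import Mathlib
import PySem

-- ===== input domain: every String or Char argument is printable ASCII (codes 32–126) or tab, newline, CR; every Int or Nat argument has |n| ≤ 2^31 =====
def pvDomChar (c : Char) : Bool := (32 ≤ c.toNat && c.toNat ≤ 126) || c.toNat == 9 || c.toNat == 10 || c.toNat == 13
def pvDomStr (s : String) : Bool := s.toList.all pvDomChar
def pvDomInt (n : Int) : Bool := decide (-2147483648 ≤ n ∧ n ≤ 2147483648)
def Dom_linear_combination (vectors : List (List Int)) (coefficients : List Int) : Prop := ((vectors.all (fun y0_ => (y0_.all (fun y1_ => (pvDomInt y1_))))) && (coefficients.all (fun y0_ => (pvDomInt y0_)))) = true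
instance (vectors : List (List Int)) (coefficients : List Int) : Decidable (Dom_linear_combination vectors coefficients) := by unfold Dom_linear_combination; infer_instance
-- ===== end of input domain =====

-- B builds the result column-wise (scale, max width, per-position sums) instead of A's
-- repeated pairwise add with zero-padding; alternative decomposition, same asymptotic cost.


-- ===== PORT A =====
def pyScale (v1 : List Int) (alpha : Int) : List Int := v1.map (fun x => x * alpha)

-- add(v1, v2): _amend pads the shorter list with zeros, then zips with (+)
def pyAdd (v1 v2 : List Int) : List Int :=
  let diff : Int := (v2.length : Int) - (v1.length : Int)
  let w1 := v1 ++ List.replicate (if diff > 0 then diff.toNat else 0) 0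
  let w2 := v2 ++ List.replicate (if diff < 0 then (-diff).toNat else 0) 0
  List.zipWith (· + ·) w1 w2

def linear_combination (vectors : List (List Int)) (coefficients : List Int) : List Int :=
  let vnew := (PySem.List.pyRange 0 vectors.length 1).map
    (fun index => pyScale (PySem.List.pyGetD vectors index []) (PySem.List.pyGetD coefficients index 0))
  let v := PySem.List.pyGetD vnew 0 []
  (PySem.List.pyRange 1 vnew.length 1).foldl
    (fun v index => pyAdd v (PySem.List.pyGetD vnew index [])) v

-- ===== PORT B =====
def linear_combination_alt (vectors : List (List Int)) (coefficients : List Int) : List Int :=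
  let scaled := (PySem.List.enumerate vectors).map
    (fun p => p.2.map (fun x => x * PySem.List.pyGetD coefficients p.1 0))
  let width := (scaled.map List.length).foldl max 0
  (List.range width).map (fun j =>
    scaled.foldl (fun s vec => if j < vec.length then s + vec.getD j 0 else s) 0)

-- ===== PRECONDITION & SPEC =====
-- A raises IndexError when vectors is empty (vnew[0]) or when coefficients is shorter than vectors.
def Pre_linear_combination (vectors : List (List Int)) (coefficients : List Int) : Prop :=
  vectors ≠ [] ∧ vectors.length ≤ coefficients.length
instance (vectors : List (List Int)) (coefficients : List Int) : Decidable (Pre_linear_combination vectors coefficients) := by unfold Pre_linear_combination; infer_instance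
def pvWitness_linear_combination : List (List Int) × List Int := ([[1, 2], [3]], [2, -1])

-- A raises IndexError when vectors is empty or coefficients is shorter than vectors; when
-- additionally every vector beyond the coefficients is empty (B never reads a missing
-- coefficient), B returns the column-wise combination of the remaining vectors ([] if none).
def Raises_linear_combination (vectors : List (List Int)) (coefficients : List Int) : Prop :=
  (vectors = [] ∨ coefficients.length < vectors.length) ∧
    ∀ v ∈ vectors.drop coefficients.length, v = []
instance (vectors : List (List Int)) (coefficients : List Int) : Decidable (Raises_linear_combination vectors coefficients) := by unfold Raises_linear_combination; infer_instance
def pvRaiseWitness_linear_combination : List (List Int) × List Int := ([], [3])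
def pvRaiseWitnessOut_linear_combination : List Int := []

def Spec_linear_combination (vectors : List (List Int)) (coefficients : List Int) (out : List Int) : Prop := out = linear_combination_alt vectors coefficients
instance (vectors : List (List Int)) (coefficients : List Int) (out : List Int) : Decidable (Spec_linear_combination vectors coefficients out) := by unfold Spec_linear_combination; infer_instance

-- ===== CLAIM (what is proved, stated in full; the proofs are below) =====
def Claim_equal_linear_combination : Prop := ∀ (vectors : List (List Int)) (coefficients : List Int), Dom_linear_combination vectors coefficients → Pre_linear_combination vectors coefficients → Spec_linear_combination vectors coefficients (linear_combination vectors coefficients)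
def Claim_raises_linear_combination : Prop := (∀ (vectors : List (List Int)) (coefficients : List Int), Dom_linear_combination vectors coefficients → Raises_linear_combination vectors coefficients → ¬ Pre_linear_combination vectors coefficients) ∧ (Dom_linear_combination (pvRaiseWitness_linear_combination.1) (pvRaiseWitness_linear_combination.2) ∧ Raises_linear_combination (pvRaiseWitness_linear_combination.1) (pvRaiseWitness_linear_combination.2) ∧ linear_combination_alt (pvRaiseWitness_linear_combination.1) (pvRaiseWitness_linear_combination.2) = pvRaiseWitnessOut_linear_combination)

-- ===== LEMMAS AND PROOFS =====

theorem getD_append_replicate (v : List Int) (k j : Nat) :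
    (v ++ List.replicate k 0).getD j 0 = v.getD j 0 := by
  rcases Nat.lt_or_ge j v.length with h | h
  · rw [List.getD_eq_getElem _ _ h,
      List.getD_eq_getElem _ _ (show j < (v ++ List.replicate k 0).length by
        rw [List.length_append, List.length_replicate]; omega),
      List.getElem_append_left h]
  · rw [List.getD_eq_default _ _ h]
    rcases Nat.lt_or_ge j (v.length + k) with h2 | h2
    · rw [List.getD_eq_getElem _ _ (show j < (v ++ List.replicate k 0).length by
        rw [List.length_append, List.length_replicate]; omega)]
      rw [List.getElem_append_right (by omega)]
      simp
    · rw [List.getD_eq_default _ _ (by rw [List.length_append, List.length_replicate]; omega)]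

theorem zipWith_pad_getD (a b : List Int) (k1 k2 j : Nat)
    (hk : a.length + k1 = b.length + k2) :
    (List.zipWith (· + ·) (a ++ List.replicate k1 0) (b ++ List.replicate k2 0)).getD j 0
      = a.getD j 0 + b.getD j 0 := by
  have hl1 : (a ++ List.replicate k1 0).length = a.length + k1 := by
    rw [List.length_append, List.length_replicate]
  have hl2 : (b ++ List.replicate k2 0).length = a.length + k1 := by
    rw [List.length_append, List.length_replicate]; omega
  rcases Nat.lt_or_ge j (a.length + k1) with h | h
  · rw [List.getD_eq_getElem _ _ (by rw [List.length_zipWith]; omega),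
      List.getElem_zipWith,
      ← List.getD_eq_getElem (a ++ List.replicate k1 0) 0 (by omega),
      ← List.getD_eq_getElem (b ++ List.replicate k2 0) 0 (by omega),
      getD_append_replicate, getD_append_replicate]
  · rw [List.getD_eq_default _ _ (by rw [List.length_zipWith]; omega),
      List.getD_eq_default _ _ (by omega), List.getD_eq_default _ _ (by omega)]
    simp

theorem pyAdd_length (a b : List Int) : (pyAdd a b).length = max a.length b.length := by
  simp only [pyAdd, List.length_zipWith, List.length_append, List.length_replicate]
  split_ifs <;> omega

theorem pyAdd_getD (a b : List Int) (j : Nat) :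
    (pyAdd a b).getD j 0 = a.getD j 0 + b.getD j 0 := by
  simp only [pyAdd]
  apply zipWith_pad_getD
  split_ifs <;> omega

theorem foldl_pyAdd_length (ls : List (List Int)) (l0 : List Int) :
    (ls.foldl pyAdd l0).length = ls.foldl (fun m v => max m v.length) l0.length := by
  induction ls generalizing l0 with
  | nil => rfl
  | cons h t ih => simp only [List.foldl_cons, ih, pyAdd_length]

theorem foldl_pyAdd_getD (ls : List (List Int)) (l0 : List Int) (j : Nat) :
    (ls.foldl pyAdd l0).getD j 0 = ls.foldl (fun s v => s + v.getD j 0) (l0.getD j 0) := by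
  induction ls generalizing l0 with
  | nil => rfl
  | cons h t ih => simp only [List.foldl_cons, ih, pyAdd_getD]

theorem foldl_if_getD (L : List (List Int)) (j : Nat) (s : Int) :
    L.foldl (fun s vec => if j < vec.length then s + vec.getD j 0 else s) s
      = L.foldl (fun s vec => s + vec.getD j 0) s := by
  induction L generalizing s with
  | nil => rfl
  | cons h t ih =>
    simp only [List.foldl_cons, ih]
    by_cases hj : j < h.length
    · rw [if_pos hj]
    · rw [if_neg hj, List.getD_eq_default _ _ (by omega), add_zero]

-- the repeated pairwise pyAdd fold equals the column-wise construction
theorem core (l0 : List Int) (ls : List (List Int)) :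
    ls.foldl pyAdd l0 =
      (List.range (((l0 :: ls).map List.length).foldl max 0)).map
        (fun j => (l0 :: ls).foldl
          (fun s vec => if j < vec.length then s + vec.getD j 0 else s) 0) := by
  have hwidth : (((l0 :: ls).map List.length).foldl max 0)
      = ls.foldl (fun m v => max m v.length) l0.length := by
    rw [List.foldl_map]
    simp only [List.foldl_cons, Nat.max_comm 0, Nat.max_zero]
  have hlenA := foldl_pyAdd_length ls l0
  apply List.ext_getElem
  · simp only [List.length_map, List.length_range, hlenA, hwidth]
  · intro j hj hj'
    simp only [List.getElem_map, List.getElem_range]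
    rw [← List.getD_eq_getElem (ls.foldl pyAdd l0) 0 hj, foldl_pyAdd_getD, foldl_if_getD]
    simp only [List.foldl_cons, zero_add]

-- both first passes build the same scaled list
theorem scaled_eq (vectors : List (List Int)) (coefficients : List Int) :
    (PySem.List.enumerate vectors).map
      (fun p => p.2.map (fun x => x * PySem.List.pyGetD coefficients p.1 0))
    = (PySem.List.pyRange 0 (vectors.length : Int) 1).map
      (fun index => pyScale (PySem.List.pyGetD vectors index [])
        (PySem.List.pyGetD coefficients index 0)) := by
  rw [PySem.List.enumerate_eq_map_pyRange vectors ([] : List Int), List.map_map]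
  rfl

-- ===== VERDICT (by name: the statement is the Claim_ definition above) =====
theorem linear_combination_spec : Claim_equal_linear_combination := by
  intro vectors coefficients _ hpre
  unfold Spec_linear_combination linear_combination linear_combination_alt
  rw [scaled_eq]
  have hlen : ((PySem.List.pyRange 0 (vectors.length : Int) 1).map
      (fun index => pyScale (PySem.List.pyGetD vectors index [])
        (PySem.List.pyGetD coefficients index 0))).length = vectors.length := by
    rw [List.length_map, PySem.List.length_pyRange_one]; omega
  generalize hS : (PySem.List.pyRange 0 (vectors.length : Int) 1).map
      (fun index => pyScale (PySem.List.pyGetD vectors index [])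
        (PySem.List.pyGetD coefficients index 0)) = S at *
  obtain ⟨l0, ls, rfl⟩ : ∃ l0 ls, S = l0 :: ls := by
    cases S with
    | nil =>
      exfalso
      cases vectors with
      | nil => exact hpre.1 rfl
      | cons a b => simp at hlen
    | cons a b => exact ⟨a, b, rfl⟩
  rw [PySem.List.foldl_pyRange_pyGetD' (l0 :: ls) ([] : List Int) pyAdd _ (by norm_num)]
  simp only [PySem.List.pyGetD_zero_cons, Int.toNat_one, List.drop_one, List.tail_cons]
  exact core l0 ls

@[simp] theorem linear_combination_raises : Claim_raises_linear_combination := by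
  unfold Claim_raises_linear_combination
  refine ⟨fun vs cs _ hr hpre => ?_, by decide, by decide, by decide⟩
  rcases hr.1 with h | h
  · exact hpre.1 h
  · exact absurd hpre.2 (Nat.not_le.mpr h)
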